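-- pv_equiv track=rewrite | github.com/modiharsh/DSA | LC_1717.py | maximumGain
-- ===== SOURCE A (Python) =====
-- def maximumGain(s: str, x: int, y: int) -> int:
--     def remove_substring(s, first, second, points):
--         stack = []
--         score = 0
--         for ch in s:
--             if stack and stack[-1] == first and ch == second:
--                 stack.pop()
--                 score += points
--             else:
--                 stack.append(ch)
--         return ''.join(stack), score
--
--     # Prioritize the substring with the higher point
--     if x > y:
--         s, score1 = remove_substring(s, 'a', 'b', x)  # Remove "ab" first
--         _, score2 = remove_substring(s, 'b', 'a', y)  # Then "ba"
--     else:
--         s, score1 = remove_substring(s, 'b', 'a', y)  # Remove "ba" first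
--         _, score2 = remove_substring(s, 'a', 'b', x)  # Then "ab"
--
--     return score1 + score2
-- ===== SOURCE B (Python) =====
-- def maximumGain(s: str, x: int, y: int) -> int:
--     # Single pass with two counters instead of two stack passes: within each
--     # maximal run of 'a'/'b' chars, match the high-value pair greedily with a
--     # pending-first counter; the residue is second*first*, so the low pair
--     # contributes min(leftover_first, unmatched_second) * low directly.
--     if x > y:
--         first, second, hi, lo = 'a', 'b', x, y
--     else:
--         first, second, hi, lo = 'b', 'a', y, x
--     cf = cs = total = 0
--     for ch in s:
--         if ch == first:
--             cf += 1
--         elif ch == second: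
--             if cf > 0:
--                 cf -= 1
--                 total += hi
--             else:
--                 cs += 1
--         else:
--             total += min(cf, cs) * lo
--             cf = cs = 0
--     total += min(cf, cs) * lo
--     return total
-- ===== Notes on version B (the rewrite author's own statement) =====
-- stated objective: simpler
-- what changed: Replaces A's two full stack passes (build stack, rescan leftover string) by a single left-to-right pass keeping two integer counters per run of a/b characters, scoring the low-value pair as a closed-form min of the leftover counters instead of a second pass.
import Mathlib
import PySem

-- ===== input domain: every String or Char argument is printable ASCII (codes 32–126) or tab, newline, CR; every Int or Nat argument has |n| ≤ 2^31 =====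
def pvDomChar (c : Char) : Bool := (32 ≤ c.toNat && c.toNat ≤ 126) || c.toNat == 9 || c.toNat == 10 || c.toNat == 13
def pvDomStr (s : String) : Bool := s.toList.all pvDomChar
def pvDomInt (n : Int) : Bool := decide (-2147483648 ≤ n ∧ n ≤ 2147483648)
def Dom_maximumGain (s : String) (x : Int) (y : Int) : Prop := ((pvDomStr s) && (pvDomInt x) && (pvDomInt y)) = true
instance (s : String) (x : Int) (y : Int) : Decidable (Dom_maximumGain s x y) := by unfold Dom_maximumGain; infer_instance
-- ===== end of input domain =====

-- B replaces A's two stack passes by one counter pass per run of 'a'/'b' chars, with the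
-- low pair scored as a closed-form min over the leftover counters (objective: simpler).

-- ===== PORT A =====
-- the stack is kept top-first (push/pop at the head); ''.join(stack) is thus st.reverse
def pvPassAux (first second : Char) (points : Int) (st : List Char × Int) (ch : Char) : List Char × Int :=
  match st.1 with
  | top :: rest => if top = first ∧ ch = second then (rest, st.2 + points) else (ch :: st.1, st.2)
  | [] => ([ch], st.2)

def pvRemoveSubstring (l : List Char) (first second : Char) (points : Int) : List Char × Int :=
  let r := l.foldl (pvPassAux first second points) ([], 0)
  (r.1.reverse, r.2)

def maximumGain (s : String) (x : Int) (y : Int) : Int :=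
  if x > y then
    let r1 := pvRemoveSubstring s.toList 'a' 'b' x
    let r2 := pvRemoveSubstring r1.1 'b' 'a' y
    r1.2 + r2.2
  else
    let r1 := pvRemoveSubstring s.toList 'b' 'a' y
    let r2 := pvRemoveSubstring r1.1 'a' 'b' x
    r1.2 + r2.2

-- ===== PORT B =====
-- state = (cf = pending `first` chars, cs = unmatched `second` chars, total)
def pvAltStep (first second : Char) (hi lo : Int) (st : Int × Int × Int) (ch : Char) : Int × Int × Int :=
  if ch = first then (st.1 + 1, st.2.1, st.2.2)
  else if ch = second then
    (if st.1 > 0 then (st.1 - 1, st.2.1, st.2.2 + hi) else (st.1, st.2.1 + 1, st.2.2))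
  else (0, 0, st.2.2 + min st.1 st.2.1 * lo)

def maximumGain_alt (s : String) (x : Int) (y : Int) : Int :=
  let c : Char × Char × Int × Int := if x > y then ('a', 'b', x, y) else ('b', 'a', y, x)
  let r := s.toList.foldl (pvAltStep c.1 c.2.1 c.2.2.1 c.2.2.2) (0, 0, 0)
  r.2.2 + min r.1 r.2.1 * c.2.2.2

-- ===== PRECONDITION & SPEC =====
def Spec_maximumGain (s : String) (x : Int) (y : Int) (out : Int) : Prop := out = maximumGain_alt s x y
instance (s : String) (x : Int) (y : Int) (out : Int) : Decidable (Spec_maximumGain s x y out) := by unfold Spec_maximumGain; infer_instance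

-- ===== CLAIM (what is proved, stated in full; the proofs are below) =====
def Claim_equal_maximumGain : Prop := ∀ (s : String) (x : Int) (y : Int), Dom_maximumGain s x y → Spec_maximumGain s x y (maximumGain s x y)

-- ===== LEMMAS AND PROOFS =====

-- Nat-counter bridge spec for B's fold
def pvNatStep (first second : Char) (hi lo : Int) (st : Nat × Nat × Int) (ch : Char) : Nat × Nat × Int :=
  if ch = first then (st.1 + 1, st.2.1, st.2.2)
  else if ch = second then
    (if 0 < st.1 then (st.1 - 1, st.2.1, st.2.2 + hi) else (st.1, st.2.1 + 1, st.2.2))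
  else (0, 0, st.2.2 + (min st.1 st.2.1 : Int) * lo)

lemma alt_bridge (f c2 : Char) (hi lo : Int) :
    ∀ (l : List Char) (a b : Nat) (t : Int),
      l.foldl (pvAltStep f c2 hi lo) ((a : Int), (b : Int), t) =
        (((l.foldl (pvNatStep f c2 hi lo) (a, b, t)).1 : Int),
         ((l.foldl (pvNatStep f c2 hi lo) (a, b, t)).2.1 : Int),
         (l.foldl (pvNatStep f c2 hi lo) (a, b, t)).2.2) := by
  intro l
  induction l with
  | nil => intro a b t; rfl
  | cons ch l ih =>
    intro a b t
    simp only [List.foldl_cons, pvAltStep, pvNatStep]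
    by_cases h1 : ch = f
    · simp only [if_pos h1]
      have : ((a : Int) + 1) = ((a + 1 : Nat) : Int) := by push_cast; ring
      rw [this, ih]
    · by_cases h2 : ch = c2
      · simp only [if_neg h1, if_pos h2]
        by_cases h3 : 0 < a
        · have h3' : (a : Int) > 0 := by exact_mod_cast h3
          simp only [if_pos h3', if_pos h3]
          have : ((a : Int) - 1) = ((a - 1 : Nat) : Int) := by
            have := Int.ofNat_sub (by omega : 1 ≤ a); omega
          rw [this, ih]
        · have h3' : ¬ ((a : Int) > 0) := by exact_mod_cast h3
          simp only [if_neg h3, if_neg h3']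
          have : ((b : Int) + 1) = ((b + 1 : Nat) : Int) := by push_cast; ring
          rw [this, ih]
      · simp only [if_neg h1, if_neg h2]
        have : min (a : Int) (b : Int) = ((min a b : Nat) : Int) := by
          rw [Nat.cast_min]
        rw [this]
        have h0 : ((0 : Nat) : Int) = (0 : Int) := rfl
        rw [← h0, ih]

lemma natStep_addTot (f c2 : Char) (hi lo : Int) :
    ∀ (l : List Char) (a b : Nat) (t d : Int),
      l.foldl (pvNatStep f c2 hi lo) (a, b, t + d) =
        ((l.foldl (pvNatStep f c2 hi lo) (a, b, t)).1,
         (l.foldl (pvNatStep f c2 hi lo) (a, b, t)).2.1,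
         (l.foldl (pvNatStep f c2 hi lo) (a, b, t)).2.2 + d) := by
  intro l
  induction l with
  | nil => intro a b t d; rfl
  | cons ch l ih =>
    intro a b t d
    simp only [List.foldl_cons, pvNatStep]
    by_cases h1 : ch = f
    · simp only [if_pos h1]; exact ih _ _ _ _
    · by_cases h2 : ch = c2
      · simp only [if_neg h1, if_pos h2]
        by_cases h3 : 0 < a
        · simp only [if_pos h3]
          have : t + d + hi = t + hi + d := by ring
          rw [this]; exact ih _ _ _ _
        · simp only [if_neg h3]; exact ih _ _ _ _
      · simp only [if_neg h1, if_neg h2]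
        have : t + d + (min a b : Int) * lo = t + (min a b : Int) * lo + d := by ring
        rw [this]; exact ih _ _ _ _

-- a blocker char c ≠ f frozen at the top of the stack: the fold never reaches below it
lemma pass_split (f c2 : Char) (p : Int) (c : Char) (hc : c ≠ f) (st0 : List Char) :
    ∀ (l : List Char) (st : List Char) (sc : Int),
      l.foldl (pvPassAux f c2 p) (st ++ c :: st0, sc) =
        ((l.foldl (pvPassAux f c2 p) (st, sc)).1 ++ c :: st0,
         (l.foldl (pvPassAux f c2 p) (st, sc)).2) := by
  intro l
  induction l with
  | nil => intro st sc; rfl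
  | cons ch l ih =>
    intro st sc
    simp only [List.foldl_cons]
    match st with
    | top :: rest =>
      simp only [pvPassAux, List.cons_append]
      by_cases h : top = f ∧ ch = c2
      · simp only [if_pos h]; exact ih _ _
      · simp only [if_neg h]
        have := ih (ch :: top :: rest) sc
        simpa using this
    | [] =>
      simp only [pvPassAux, List.nil_append]
      have hcond : ¬ (c = f ∧ ch = c2) := fun h => hc h.1
      simp only [if_neg hcond]
      have := ih [ch] sc
      simpa using this

-- folding c2's in pass2 (first = c2, second = f): every c2 is pushed
lemma pass2_push_c2 (f c2 : Char) (q : Int) (hne : f ≠ c2) :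
    ∀ (b : Nat) (st : List Char) (sc : Int),
      (List.replicate b c2).foldl (pvPassAux c2 f q) (st, sc) =
        (List.replicate b c2 ++ st, sc) := by
  intro b
  induction b with
  | zero => intro st sc; rfl
  | succ b ih =>
    intro st sc
    simp only [List.replicate_succ, List.foldl_cons]
    have step : pvPassAux c2 f q (st, sc) c2 = (c2 :: st, sc) := by
      match st with
      | [] => rfl
      | top :: rest =>
        have hcond : ¬ (top = c2 ∧ c2 = f) := fun h => hne h.2.symm
        simp only [pvPassAux, if_neg hcond]
    rw [step, ih]
    have : List.replicate b c2 ++ c2 :: st = c2 :: (List.replicate b c2 ++ st) := by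
      rw [List.append_cons, ← List.replicate_succ', List.replicate_succ, List.cons_append]
    rw [this, List.cons_append]

-- folding f's in pass2 onto an all-f stack: every f is pushed
lemma pass2_push_f (f c2 : Char) (q : Int) (hne : f ≠ c2) :
    ∀ (a k : Nat) (sc : Int),
      (List.replicate a f).foldl (pvPassAux c2 f q) (List.replicate k f, sc) =
        (List.replicate (a + k) f, sc) := by
  intro a
  induction a with
  | zero => intro k sc; simp
  | succ a ih =>
    intro k sc
    simp only [List.replicate_succ, List.foldl_cons]
    have step : pvPassAux c2 f q (List.replicate k f, sc) f = (List.replicate (k + 1) f, sc) := by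
      match hk : k with
      | 0 => rfl
      | Nat.succ k' =>
        simp [List.replicate_succ, pvPassAux, hne]
    rw [step, ih]
    congr 1
    congr 1
    omega

def pvLeftover (f c2 : Char) (a b : Nat) : List Char :=
  if a ≤ b then List.replicate (b - a) c2 else List.replicate (a - b) f

-- the second pass on the residue c2^b f^a of a block scores min a b * q
lemma pass2_block (f c2 : Char) (q : Int) (hne : f ≠ c2) :
    ∀ (a b : Nat) (sc : Int),
      (List.replicate b c2 ++ List.replicate a f).foldl (pvPassAux c2 f q) ([], sc) =
        (pvLeftover f c2 a b, sc + (min a b : Int) * q) := by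
  intro a
  induction a with
  | zero =>
    intro b sc
    rw [List.foldl_append]
    rw [pass2_push_c2 f c2 q hne b [] sc]
    simp [pvLeftover]
  | succ a ih =>
    intro b sc
    match b with
    | 0 =>
      simp only [List.replicate_zero, List.nil_append]
      have := pass2_push_f f c2 q hne (a + 1) 0 sc
      simp only [List.replicate_zero] at this
      rw [this]
      simp only [pvLeftover, Nat.add_zero, Nat.cast_zero]
      rw [if_neg (by omega : ¬ a + 1 ≤ 0)]
      have : min ((a : Int) + 1) 0 = 0 := by omega
      simp [this]
    | Nat.succ b' =>
      rw [List.foldl_append, pass2_push_c2 f c2 q hne _ [] sc]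
      simp only [List.append_nil, List.replicate_succ, List.foldl_cons]
      have step : pvPassAux c2 f q (c2 :: List.replicate b' c2, sc) f =
          (List.replicate b' c2, sc + q) := by
        simp [pvPassAux]
      rw [step]
      have ihb := ih b' (sc + q)
      rw [List.foldl_append, pass2_push_c2 f c2 q hne b' [] (sc + q)] at ihb
      simp only [List.append_nil] at ihb
      rw [ihb]
      have hL : pvLeftover f c2 a b' = pvLeftover f c2 (a + 1) (b' + 1) := by
        simp only [pvLeftover]
        by_cases hab : a ≤ b'
        · rw [if_pos hab, if_pos (by omega : a + 1 ≤ b' + 1)]; congr 1; omega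
        · rw [if_neg hab, if_neg (by omega : ¬ a + 1 ≤ b' + 1)]; congr 1; omega
      have hS : sc + q + min (a : Int) (b' : Int) * q =
          sc + min (((a + 1 : Nat) : Int)) (((b' + 1 : Nat) : Int)) * q := by
        have hm : min (((a + 1 : Nat) : Int)) (((b' + 1 : Nat) : Int)) =
            min (a : Int) (b' : Int) + 1 := by
          push_cast; omega
        rw [hm]; ring
      simp only [Nat.succ_eq_add_one]
      rw [hL, hS]

-- score accumulator of a pass is additive
lemma pass_score_add (f c2 : Char) (p : Int) :
    ∀ (l : List Char) (st : List Char) (sc d : Int),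
      l.foldl (pvPassAux f c2 p) (st, sc + d) =
        ((l.foldl (pvPassAux f c2 p) (st, sc)).1,
         (l.foldl (pvPassAux f c2 p) (st, sc)).2 + d) := by
  intro l
  induction l with
  | nil => intro st sc d; rfl
  | cons ch l ih =>
    intro st sc d
    simp only [List.foldl_cons]
    match st with
    | [] => simp only [pvPassAux]; exact ih _ _ _
    | top :: rest =>
      simp only [pvPassAux]
      by_cases h : top = f ∧ ch = c2
      · simp only [if_pos h]
        have : sc + d + p = sc + p + d := by ring
        rw [this]; exact ih _ _ _
      · simp only [if_neg h]; exact ih _ _ _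

-- the heart: A's two passes from a block-shaped stack = B's Nat-counter fold
lemma main_lemma (f c2 : Char) (p q : Int) (hne : f ≠ c2) :
    ∀ (l : List Char) (a b : Nat) (sc : Int),
      (l.foldl (pvPassAux f c2 p) (List.replicate a f ++ List.replicate b c2, sc)).2 +
        ((l.foldl (pvPassAux f c2 p) (List.replicate a f ++ List.replicate b c2, sc)).1.reverse.foldl
          (pvPassAux c2 f q) ([], 0)).2 =
      (l.foldl (pvNatStep f c2 p q) (a, b, sc)).2.2 +
        (min (l.foldl (pvNatStep f c2 p q) (a, b, sc)).1
             (l.foldl (pvNatStep f c2 p q) (a, b, sc)).2.1 : Int) * q := by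
  intro l
  induction l with
  | nil =>
    intro a b sc
    simp only [List.foldl_nil]
    rw [List.reverse_append, List.reverse_replicate, List.reverse_replicate]
    rw [pass2_block f c2 q hne a b 0]
    simp
  | cons ch l ih =>
    intro a b sc
    simp only [List.foldl_cons]
    by_cases h1 : ch = f
    · -- push f
      have step : pvPassAux f c2 p (List.replicate a f ++ List.replicate b c2, sc) ch =
          (List.replicate (a + 1) f ++ List.replicate b c2, sc) := by
        rw [h1]
        match a, b with
        | 0, 0 => rfl
        | 0, Nat.succ b' =>
          simp [List.replicate_succ, pvPassAux, Ne.symm hne]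
        | Nat.succ a', _ =>
          simp [List.replicate_succ, pvPassAux, hne]
      rw [step]
      have stepN : pvNatStep f c2 p q (a, b, sc) ch = (a + 1, b, sc) := by
        simp [pvNatStep, h1]
      rw [stepN]
      exact ih (a + 1) b sc
    · by_cases h2 : ch = c2
      · by_cases h3 : 0 < a
        · -- pop f, score p
          obtain ⟨a', rfl⟩ : ∃ a', a = a' + 1 := ⟨a - 1, by omega⟩
          have step : pvPassAux f c2 p (List.replicate (a' + 1) f ++ List.replicate b c2, sc) ch =
              (List.replicate a' f ++ List.replicate b c2, sc + p) := by
            rw [h2]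
            simp [List.replicate_succ, pvPassAux]
          rw [step]
          have stepN : pvNatStep f c2 p q (a' + 1, b, sc) ch = (a', b, sc + p) := by
            simp [pvNatStep, h2, Ne.symm hne]
          rw [stepN]
          exact ih a' b (sc + p)
        · -- push c2
          obtain rfl : a = 0 := by omega
          have step : pvPassAux f c2 p (List.replicate 0 f ++ List.replicate b c2, sc) ch =
              (List.replicate 0 f ++ List.replicate (b + 1) c2, sc) := by
            rw [h2]
            match b with
            | 0 => rfl
            | Nat.succ b' =>
              simp [List.replicate_succ, pvPassAux, Ne.symm hne]
          rw [step]
          have stepN : pvNatStep f c2 p q (0, b, sc) ch = (0, b + 1, sc) := by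
            simp [pvNatStep, h2, Ne.symm hne]
          rw [stepN]
          exact ih 0 (b + 1) sc
      · -- blocker: push ch, freeze everything below it
        have step : pvPassAux f c2 p (List.replicate a f ++ List.replicate b c2, sc) ch =
            (ch :: (List.replicate a f ++ List.replicate b c2), sc) := by
          match a, b with
          | 0, 0 => rfl
          | 0, Nat.succ b' =>
            simp [List.replicate_succ, pvPassAux, h2]
          | Nat.succ a', _ =>
            simp [List.replicate_succ, pvPassAux, h2]
        rw [step]
        -- factor the rest of pass1 above the blocker
        have split1 := pass_split f c2 p ch h1 (List.replicate a f ++ List.replicate b c2) l [] sc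
        simp only [List.nil_append] at split1
        rw [split1]
        -- second pass over (rest-stack ++ ch :: block).reverse
        rw [List.reverse_append, List.reverse_cons, List.reverse_append,
            List.reverse_replicate, List.reverse_replicate]
        set r1 := l.foldl (pvPassAux f c2 p) ([], sc) with hr1
        -- fold pass2 over the reversed block first
        rw [List.append_assoc, List.foldl_append]
        rw [pass2_block f c2 q hne a b 0]
        simp only [List.singleton_append, List.foldl_cons, zero_add]
        have stepc : pvPassAux c2 f q (pvLeftover f c2 a b, (min a b : Int) * q) ch =
            (ch :: pvLeftover f c2 a b, (min a b : Int) * q) := by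
          match hL : pvLeftover f c2 a b with
          | [] => rfl
          | top :: rest =>
            simp [pvPassAux, h1]
        rw [stepc]
        have split2 := pass_split c2 f q ch h2 (pvLeftover f c2 a b) r1.1.reverse [] ((min a b : Int) * q)
        simp only [List.nil_append] at split2
        rw [split2]
        have sadd := pass_score_add c2 f q r1.1.reverse [] 0 ((min a b : Int) * q)
        simp only [zero_add] at sadd
        rw [sadd]
        have stepN : pvNatStep f c2 p q (a, b, sc) ch = (0, 0, sc + (min a b : Int) * q) := by
          simp [pvNatStep, if_neg h1, if_neg h2]
        rw [stepN]
        rw [natStep_addTot f c2 p q l 0 0 sc ((min a b : Int) * q)]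
        have hih := ih 0 0 sc
        simp only [List.replicate_zero, List.nil_append, ← hr1] at hih
        linarith [hih]

-- ===== VERDICT (by name: the statement is the Claim_ definition above) =====
theorem maximumGain_spec : Claim_equal_maximumGain := by
  intro s x y _
  unfold Spec_maximumGain maximumGain maximumGain_alt pvRemoveSubstring
  by_cases hxy : x > y
  · simp only [if_pos hxy]
    have hb := alt_bridge 'a' 'b' x y s.toList 0 0 0
    simp only [Nat.cast_zero] at hb
    have hm := main_lemma 'a' 'b' x y (by decide) s.toList 0 0 0
    simp only [List.replicate_zero, List.nil_append] at hm
    simpa [hb] using hm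
  · simp only [if_neg hxy]
    have hb := alt_bridge 'b' 'a' y x s.toList 0 0 0
    simp only [Nat.cast_zero] at hb
    have hm := main_lemma 'b' 'a' y x (by decide) s.toList 0 0 0
    simp only [List.replicate_zero, List.nil_append] at hm
    simpa [hb] using hm
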